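-- pv_equiv track=rewrite | github.com/crg253/free-movie-suggestion | tests/endtoend_test.py | sort_by_year_helper
-- ===== SOURCE A (Python) =====
-- def sort_by_year_helper(title):
--     # remove 'The' from between year and title
--     if title[4:8] == "The ":
--         slug = title[0:4] + title[8:]
--     else:
--         slug = title
--     to_remove = [" ", "'", ",", "!", ".", ":", "&", "-"]
--     for item in to_remove:
--         slug = slug.replace(item, "")
--     return slug.lower()
-- ===== SOURCE B (Python) =====
-- REMOVE = set(" ',!.:&-")
--
--
-- def sort_by_year_helper(title):
--     # remove 'The' from between year and title
--     if title[4:8] == "The ":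
--         slug = title[0:4] + title[8:]
--     else:
--         slug = title
--     return "".join(ch for ch in slug if ch not in REMOVE).lower()
-- ===== Notes on version B (the rewrite author's own statement) =====
-- stated objective: simpler
-- what changed: Replaced the eight sequential full-string replace passes with a single character-filtering pass against a precomputed removal set, joined once and lowercased.
import Mathlib
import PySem

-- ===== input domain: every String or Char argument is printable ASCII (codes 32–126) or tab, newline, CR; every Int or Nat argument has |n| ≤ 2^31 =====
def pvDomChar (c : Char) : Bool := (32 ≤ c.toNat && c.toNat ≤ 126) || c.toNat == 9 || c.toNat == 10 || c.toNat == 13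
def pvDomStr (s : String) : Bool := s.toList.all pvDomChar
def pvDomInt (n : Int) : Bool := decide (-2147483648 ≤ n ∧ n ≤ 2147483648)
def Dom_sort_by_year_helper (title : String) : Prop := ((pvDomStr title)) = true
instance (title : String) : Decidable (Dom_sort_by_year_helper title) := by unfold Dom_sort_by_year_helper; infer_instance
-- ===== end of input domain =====

-- B replaces A's eight sequential replace passes by a single character-filter pass against a removal set; objective: simpler.


-- ===== PORT A =====
def sort_by_year_helper (title : String) : String :=
  let slug :=
    if PySem.Str.slice title (some 4) (some 8) = "The " then
      PySem.Str.slice title (some 0) (some 4) ++ PySem.Str.slice title (some 8) none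
    else title
  let to_remove : List String := [" ", "'", ",", "!", ".", ":", "&", "-"]
  let slug2 := to_remove.foldl (fun s item => PySem.Str.replace s item "") slug
  PySem.Str.lower slug2

-- ===== PORT B =====
-- REMOVE = set(" ',!.:&-")
def pvRemoveSet : PySem.Set Char := PySem.Set.ofList " ',!.:&-".toList

def sort_by_year_helper_alt (title : String) : String :=
  let slug :=
    if PySem.Str.slice title (some 4) (some 8) = "The " then
      PySem.Str.slice title (some 0) (some 4) ++ PySem.Str.slice title (some 8) none
    else title
  PySem.Str.lower (String.ofList (slug.toList.filter (fun ch => !(PySem.Set.contains pvRemoveSet ch))))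

-- ===== PRECONDITION & SPEC =====
def Spec_sort_by_year_helper (title : String) (out : String) : Prop := out = sort_by_year_helper_alt title
instance (title : String) (out : String) : Decidable (Spec_sort_by_year_helper title out) := by unfold Spec_sort_by_year_helper; infer_instance

-- ===== CLAIM (what is proved, stated in full; the proofs are below) =====
def Claim_equal_sort_by_year_helper : Prop := ∀ (title : String), Dom_sort_by_year_helper title → Spec_sort_by_year_helper title (sort_by_year_helper title)

-- ===== LEMMAS AND PROOFS =====

-- replacing a single character by "" is exactly filtering it out
theorem pv_go_single (c : Char) (l : List Char) : ∀ (fuel : Nat) (acc : List Char), l.length ≤ fuel →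
    PySem.Chars.replace.go [c] [] fuel l acc = acc.reverse ++ l.filter (fun x => x != c) := by
  induction l with
  | nil => intro fuel acc _; cases fuel <;> simp [PySem.Chars.replace.go]
  | cons x t ih =>
    intro fuel acc h
    cases fuel with
    | zero => simp at h
    | succ n =>
      by_cases hc : c = x
      · subst hc
        simp [PySem.Chars.replace.go, List.isPrefixOf, ih n acc (by simpa using h)]
      · simp [PySem.Chars.replace.go, List.isPrefixOf, hc, ih n (x :: acc) (by simpa using h),
          bne, Ne.symm hc]

theorem pv_replace_single (c : Char) (l : List Char) :
    PySem.Chars.replace l [c] [] = l.filter (fun x => x != c) := by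
  simpa [PySem.Chars.replace] using pv_go_single c l l.length [] (le_refl _)

theorem pv_removeset_eval : pvRemoveSet = [' ', '\'', ',', '!', '.', ':', '&', '-'] := by decide

theorem pv_contains_eval (a : Char) :
    PySem.Set.contains [' ', '\'', ',', '!', '.', ':', '&', '-'] a =
      (a == ' ' || (a == '\'' || (a == ',' || (a == '!' || (a == '.' || (a == ':' || (a == '&' || (a == '-' || false)))))))) := rfl

theorem pv_char_pred (a : Char) :
    (!(PySem.Set.contains pvRemoveSet a)) =
      (a != '-' && (a != '&' && (a != ':' && (a != '.' && (a != '!' && (a != ',' && (a != '\'' && a != ' '))))))) := by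
  rw [pv_removeset_eval, pv_contains_eval]
  simp only [Bool.or_false, Bool.not_or, bne]
  ac_rfl

theorem pv_fold_eq_filter (s : String) :
    (([" ", "'", ",", "!", ".", ":", "&", "-"] : List String).foldl
        (fun t item => PySem.Str.replace t item "") s)
      = String.ofList (s.toList.filter (fun ch => !(PySem.Set.contains pvRemoveSet ch))) := by
  apply String.ext
  simp only [String.toList_ofList, List.foldl, PySem.Str.toList_replace]
  simp only [show (" " : String).toList = [' '] from rfl, show ("'" : String).toList = ['\''] from rfl,
    show ("," : String).toList = [','] from rfl, show ("!" : String).toList = ['!'] from rfl,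
    show ("." : String).toList = ['.'] from rfl, show (":" : String).toList = [':'] from rfl,
    show ("&" : String).toList = ['&'] from rfl, show ("-" : String).toList = ['-'] from rfl,
    show ("" : String).toList = [] from rfl]
  simp only [pv_replace_single, List.filter_filter]
  refine List.filter_congr ?_
  intro a _
  exact (pv_char_pred a).symm

-- ===== VERDICT (by name: the statement is the Claim_ definition above) =====
theorem sort_by_year_helper_spec : Claim_equal_sort_by_year_helper := by
  intro title _
  unfold Spec_sort_by_year_helper sort_by_year_helper sort_by_year_helper_alt
  dsimp only
  rw [pv_fold_eq_filter]
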